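-- pv_equiv track=rewrite | github.com/Zineddine-Tighidet/MemoReason | src/dataset_export/fictional_dataset.py | _merge_used_temporal_values
-- ===== SOURCE A (Python) =====
-- from typing import Any
--
-- def _merge_used_temporal_values(
--     existing: dict[str, dict[str, set[Any]]] | None,
--     additional: dict[str, dict[str, set[Any]]],
-- ) -> dict[str, dict[str, set[Any]]]:
--     merged: dict[str, dict[str, set[Any]]] = {
--         str(entity_id): {str(attr): set(values) for attr, values in values_by_attr.items()}
--         for entity_id, values_by_attr in (existing or {}).items()
--     }
--     for entity_id, values_by_attr in additional.items():
--         target = merged.setdefault(str(entity_id), {})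
--         for attr, values in values_by_attr.items():
--             target.setdefault(str(attr), set()).update(values)
--     return merged
-- ===== SOURCE B (Python) =====
-- from typing import Any
--
-- def _merge_used_temporal_values(
--     existing: "dict[str, dict[str, set[Any]]] | None",
--     additional: "dict[str, dict[str, set[Any]]]",
-- ) -> "dict[str, dict[str, set[Any]]]":
--     # Join-style construction: compute the merged key order up front, then build
--     # each entry independently by looking both sources up (no mutable accumulator).
--     ex = existing or {}
--
--     def merged_entry(entity_id: str) -> "dict[str, set[Any]]":
--         ex_attrs = ex.get(entity_id, {})
--         add_attrs = additional.get(entity_id, {})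
--         attr_order = [*ex_attrs, *(a for a in add_attrs if a not in ex_attrs)]
--         return {attr: set(ex_attrs.get(attr, ())) | set(add_attrs.get(attr, ()))
--                 for attr in attr_order}
--
--     entity_order = [*ex, *(e for e in additional if e not in ex)]
--     return {entity_id: merged_entry(entity_id) for entity_id in entity_order}
-- ===== Notes on version B (the rewrite author's own statement) =====
-- stated objective: alternative
-- what changed: B replaces A's mutable-accumulator merge (copy existing via a nested dict comprehension, then destructively merge additional with setdefault/update) with a join-style construction: it computes the merged entity and attribute key orders up front and builds every output entry independently by pure lookups into both sources.
import Mathlib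
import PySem

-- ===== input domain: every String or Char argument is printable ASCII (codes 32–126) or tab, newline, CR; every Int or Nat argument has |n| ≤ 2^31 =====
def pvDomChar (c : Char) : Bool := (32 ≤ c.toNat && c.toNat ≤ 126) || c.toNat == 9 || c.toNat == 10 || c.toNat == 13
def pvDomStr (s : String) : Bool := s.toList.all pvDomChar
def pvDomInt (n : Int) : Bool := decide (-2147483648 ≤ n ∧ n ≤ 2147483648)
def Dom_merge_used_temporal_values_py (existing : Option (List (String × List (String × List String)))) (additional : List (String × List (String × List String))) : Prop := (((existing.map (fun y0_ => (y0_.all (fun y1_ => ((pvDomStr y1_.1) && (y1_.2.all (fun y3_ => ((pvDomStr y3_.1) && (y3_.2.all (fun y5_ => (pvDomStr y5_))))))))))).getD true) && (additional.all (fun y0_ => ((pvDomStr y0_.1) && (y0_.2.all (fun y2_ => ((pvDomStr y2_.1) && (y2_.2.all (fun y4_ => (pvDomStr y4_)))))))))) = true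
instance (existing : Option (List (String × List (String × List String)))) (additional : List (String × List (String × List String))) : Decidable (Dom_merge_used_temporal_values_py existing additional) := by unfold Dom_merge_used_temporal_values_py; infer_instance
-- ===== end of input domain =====

-- B replaces A's mutable-accumulator merge (copy existing, then merge additional into it)
-- with a join-style construction: it computes the merged key order up front and builds every
-- entry independently by looking both sources up (objective: alternative, same cost).

-- ===== PORT A =====
-- Dict/Set boundary: the Python arguments are dicts of dicts of sets; the association lists are
-- turned into PySem.Dict (last value wins, first position kept) and the inner element lists are
-- deduplicated by PySem.Set.ofList exactly where A's Python calls set(values).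
-- str(entity_id)/str(attr) are identities on str keys and are ported as such.
def merge_used_temporal_values_py (existing : Option (List (String × List (String × List String)))) (additional : List (String × List (String × List String))) : List (String × List (String × List String)) :=
  let existingD : PySem.Dict String (PySem.Dict String (List String)) :=
    PySem.Dict.ofList ((existing.getD []).map (fun p => (p.1, PySem.Dict.ofList p.2)))
  let additionalD : PySem.Dict String (PySem.Dict String (List String)) :=
    PySem.Dict.ofList (additional.map (fun p => (p.1, PySem.Dict.ofList p.2)))
  -- merged = {str(eid): {str(attr): set(values) …} …} over (existing or {}).items()
  let merged : PySem.Dict String (PySem.Dict String (PySem.Set String)) :=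
    existingD.items.foldl
      (fun m p => m.insert p.1
        (p.2.items.foldl (fun inn q => inn.insert q.1 (PySem.Set.ofList q.2)) PySem.Dict.empty))
      PySem.Dict.empty
  -- for eid, vba in additional.items(): target = merged.setdefault(eid, {}); target.setdefault(attr, set()).update(values)
  let merged :=
    additionalD.items.foldl
      (fun m p =>
        let m := m.setdefault p.1 PySem.Dict.empty
        p.2.items.foldl
          (fun m q => m.modify p.1 PySem.Dict.empty
            (fun inn => inn.modify q.1 PySem.Set.empty (fun s => PySem.Set.update s q.2)))
          m)
      merged
  merged.items.map (fun p => (p.1, p.2.items))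

-- ===== PORT B =====
-- merged_entry(eid): attr order = existing attrs then new additional attrs; each value is
-- set(ex_attrs.get(attr,())) | set(add_attrs.get(attr,()))
def pvMergedEntry (exA addA : PySem.Dict String (List String)) : List (String × List String) :=
  let attrOrder := exA.keys ++ addA.keys.filter (fun a => !exA.contains a)
  attrOrder.map (fun a =>
    (a, PySem.Set.union (PySem.Set.ofList (exA.getD a [])) (PySem.Set.ofList (addA.getD a []))))

def merge_used_temporal_values_py_alt (existing : Option (List (String × List (String × List String)))) (additional : List (String × List (String × List String))) : List (String × List (String × List String)) :=
  let exD : PySem.Dict String (PySem.Dict String (List String)) :=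
    PySem.Dict.ofList ((existing.getD []).map (fun p => (p.1, PySem.Dict.ofList p.2)))
  let addD : PySem.Dict String (PySem.Dict String (List String)) :=
    PySem.Dict.ofList (additional.map (fun p => (p.1, PySem.Dict.ofList p.2)))
  -- entity_order = [*ex, *(e for e in additional if e not in ex)]
  let entityOrder := exD.keys ++ addD.keys.filter (fun e => !exD.contains e)
  entityOrder.map (fun eid =>
    (eid, pvMergedEntry (exD.getD eid PySem.Dict.empty) (addD.getD eid PySem.Dict.empty)))

-- ===== PRECONDITION & SPEC =====
def Spec_merge_used_temporal_values_py (existing : Option (List (String × List (String × List String)))) (additional : List (String × List (String × List String))) (out : List (String × List (String × List String))) : Prop := out = merge_used_temporal_values_py_alt existing additional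
instance (existing : Option (List (String × List (String × List String)))) (additional : List (String × List (String × List String))) (out : List (String × List (String × List String))) : Decidable (Spec_merge_used_temporal_values_py existing additional out) := by unfold Spec_merge_used_temporal_values_py; infer_instance

-- ===== CLAIM (what is proved, stated in full; the proofs are below) =====
def Claim_equal_merge_used_temporal_values_py : Prop := ∀ (existing : Option (List (String × List (String × List String)))) (additional : List (String × List (String × List String))), Dom_merge_used_temporal_values_py existing additional → Spec_merge_used_temporal_values_py existing additional (merge_used_temporal_values_py existing additional)

-- ===== LEMMAS AND PROOFS =====

-- A's inner loop (update the inner dict of one entity by the items of one additional inner dict)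
def pvInnerMerge (v : PySem.Dict String (PySem.Set String)) (d : PySem.Dict String (List String)) :
    PySem.Dict String (PySem.Set String) :=
  d.items.foldl (fun inn q => inn.modify q.1 PySem.Set.empty (fun s => PySem.Set.update s q.2)) v

-- hoisting repeated modify at one key out of a fold
theorem pv_foldl_modify_insert {κ ν β : Type} [BEq κ] [LawfulBEq κ]
    (l : List β) (g : β → ν → ν) (d0 : ν) (m : PySem.Dict κ ν) (k : κ) (v : ν) :
    l.foldl (fun m q => m.modify k d0 (g q)) (m.insert k v)
      = m.insert k (l.foldl (fun inn q => g q inn) v) := by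
  induction l generalizing v with
  | nil => rfl
  | cons q l ih =>
    have hmod : (m.insert k v).modify k d0 (g q) = m.insert k (g q v) := by
      show (m.insert k v).insert k (g q ((m.insert k v).getD k d0)) = _
      rw [PySem.Dict.getD_insert_self, PySem.Dict.insert_insert_self]
    simp only [List.foldl_cons]
    rw [hmod, ih]

-- re-inserting a present key with its own value is the identity
theorem pv_insert_getD_self {κ ν : Type} [BEq κ] [LawfulBEq κ]
    (d : PySem.Dict κ ν) (k : κ) (d0 : ν) (hnd : d.keys.Nodup) (hc : d.contains k = true) :
    d.insert k (d.getD k d0) = d := by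
  apply PySem.Dict.ext
  rw [PySem.Dict.items_insert_of_contains _ _ hc]
  have : ∀ r ∈ d.items, (if (r.1 == k) = true then (k, d.getD k d0) else r) = id r := by
    intro r hr
    by_cases h : r.1 = k
    · have hv : d.getD k d0 = r.2 := by
        have : (k, r.2) ∈ d.items := by rw [← h]; exact hr
        exact PySem.Dict.getD_of_mem_items _ this hnd d0
      cases r
      simp_all
    · simp [h]
  rw [List.map_congr_left this, List.map_id]

-- one additional-entity step of A, written as a single insert of a merged inner dict
theorem pv_step_eq (m : PySem.Dict String (PySem.Dict String (PySem.Set String)))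
    (p : String × PySem.Dict String (List String)) (hm : m.keys.Nodup) :
    p.2.items.foldl
        (fun m q => m.modify p.1 PySem.Dict.empty
          (fun inn => inn.modify q.1 PySem.Set.empty (fun s => PySem.Set.update s q.2)))
        (m.setdefault p.1 PySem.Dict.empty)
      = m.insert p.1 (pvInnerMerge (m.getD p.1 PySem.Dict.empty) p.2) := by
  by_cases hc : m.contains p.1 = true
  · rw [PySem.Dict.setdefault_of_contains _ _ hc]
    have h1 := pv_foldl_modify_insert p.2.items
      (fun q inn => inn.modify q.1 PySem.Set.empty (fun s => PySem.Set.update s q.2))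
      PySem.Dict.empty m p.1 (m.getD p.1 PySem.Dict.empty)
    rw [pv_insert_getD_self m p.1 PySem.Dict.empty hm hc] at h1
    exact h1
  · have hc' : m.contains p.1 = false := by simpa using hc
    rw [PySem.Dict.setdefault_of_not_contains _ _ hc']
    rw [pv_foldl_modify_insert]
    rw [PySem.Dict.getD_of_not_contains _ _ hc']
    rfl

-- A's whole second phase equals a fold of insert-merged-inner steps
theorem pv_phase2_eq (l : List (String × PySem.Dict String (List String)))
    (m : PySem.Dict String (PySem.Dict String (PySem.Set String))) (hm : m.keys.Nodup) :
    l.foldl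
        (fun m p =>
          p.2.items.foldl
            (fun m q => m.modify p.1 PySem.Dict.empty
              (fun inn => inn.modify q.1 PySem.Set.empty (fun s => PySem.Set.update s q.2)))
            (m.setdefault p.1 PySem.Dict.empty))
        m
      = l.foldl (fun m p => m.insert p.1 (pvInnerMerge (m.getD p.1 PySem.Dict.empty) p.2)) m := by
  induction l generalizing m with
  | nil => rfl
  | cons p l ih =>
    simp only [List.foldl_cons]
    rw [pv_step_eq m p hm]
    exact ih _ (PySem.Dict.nodup_keys_insert _ _ _ hm)

-- apply the combine only when the lookup hit
def pvApply? {ν β : Type} (f : ν → β → ν) (v : ν) : Option β → ν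
  | some b => f v b
  | none => v

-- the merge fold (insert key ↦ combine (old value or d0) with the new payload), item by item:
-- present keys get combined in place, fresh keys are appended in source order
theorem pv_merge_items {κ ν β : Type} [BEq κ] [LawfulBEq κ]
    (f : ν → β → ν) (d0 : ν) (l : List (κ × β)) (m : PySem.Dict κ ν)
    (hm : m.keys.Nodup) (hl : (l.map Prod.fst).Nodup) :
    (l.foldl (fun m p => m.insert p.1 (f (m.getD p.1 d0) p.2)) m).items
      = m.items.map (fun r =>
          (r.1, pvApply? f r.2 ((PySem.Dict.mk l).get? r.1)))
        ++ (l.filter (fun p => !m.contains p.1)).map (fun p => (p.1, f d0 p.2)) := by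
  induction l generalizing m with
  | nil =>
    simp [PySem.Dict.get?, pvApply?]
  | cons p t ih =>
    obtain ⟨pk, pb⟩ := p
    simp only [List.foldl_cons]
    have hnd' : ((pk :: t.map Prod.fst)).Nodup := by simpa using hl
    have hpt : pk ∉ t.map Prod.fst := (List.nodup_cons.mp hnd').1
    have htnd : (t.map Prod.fst).Nodup := (List.nodup_cons.mp hnd').2
    set m' := m.insert pk (f (m.getD pk d0) pb) with hm'
    have hm'nd : m'.keys.Nodup := PySem.Dict.nodup_keys_insert _ _ _ hm
    have hcont' : ∀ q ∈ t, m'.contains q.1 = m.contains q.1 := by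
      intro q hq
      rw [hm', PySem.Dict.contains_insert]
      have : (q.1 == pk) = false := by
        apply beq_eq_false_iff_ne.mpr
        intro h
        exact hpt (h ▸ List.mem_map_of_mem hq)
      simp [this]
    have hfilter : t.filter (fun q => !m'.contains q.1) = t.filter (fun q => !m.contains q.1) :=
      List.filter_congr (fun q hq => by rw [hcont' q hq])
    rw [ih m' hm'nd htnd, hfilter]
    by_cases hc : m.contains pk = true
    · -- pk already present: it is combined in place, p contributes nothing new
      have hfilterp : ((pk, pb) :: t).filter (fun q => !m.contains q.1)
          = t.filter (fun q => !m.contains q.1) := by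
        simp [hc]
      rw [hfilterp]
      congr 1
      rw [hm', PySem.Dict.items_insert_of_contains _ _ hc, List.map_map]
      apply List.map_congr_left
      intro r hr
      by_cases h : r.1 = pk
      · have hv : m.getD pk d0 = r.2 := by
          have : (pk, r.2) ∈ m.items := by rw [← h]; exact hr
          exact PySem.Dict.getD_of_mem_items _ this hm d0
        have hnone : ({ items := t } : PySem.Dict κ β).get? pk = none := by
          rw [PySem.Dict.get?_eq_none_iff_not_mem_keys, PySem.Dict.keys_mk]
          exact hpt
        simp [Function.comp, h, hv, PySem.Dict.get?_mk_cons, hnone, pvApply?]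
      · have : (r.1 == pk) = false := beq_eq_false_iff_ne.mpr h
        have : (pk == r.1) = false := beq_eq_false_iff_ne.mpr (fun hh => h hh.symm)
        simp [Function.comp, PySem.Dict.get?_mk_cons, beq_eq_false_iff_ne.mpr h, this, pvApply?]
    · -- fresh key: p is appended, existing entries are untouched by it
      have hc' : m.contains pk = false := by simpa using hc
      have hnotmem : pk ∉ m.keys := by
        intro h; rw [← PySem.Dict.contains_iff_mem_keys] at h; rw [hc'] at h; cases h
      have hfilterp : ((pk, pb) :: t).filter (fun q => !m.contains q.1)
          = (pk, pb) :: t.filter (fun q => !m.contains q.1) := by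
        simp [hc']
      rw [hfilterp]
      rw [hm', PySem.Dict.getD_of_not_contains _ _ hc',
        PySem.Dict.items_insert_of_not_contains _ _ hc', List.map_append]
      have h1 : m.items.map (fun r =>
            (r.1, pvApply? f r.2 (({ items := t } : PySem.Dict κ β).get? r.1)))
          = m.items.map (fun r =>
            (r.1, pvApply? f r.2 (({ items := (pk, pb) :: t } : PySem.Dict κ β).get? r.1))) := by
        apply List.map_congr_left
        intro r hr
        have hrk : r.1 ∈ m.keys := by
          simp only [PySem.Dict.keys]; exact List.mem_map_of_mem hr
        have : (pk == r.1) = false := by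
          apply beq_eq_false_iff_ne.mpr
          intro h; exact hnotmem (h ▸ hrk)
        simp [PySem.Dict.get?_mk_cons, this, pvApply?]
      have h2 : [(pk, f d0 pb)].map (fun r =>
            (r.1, pvApply? f r.2 (({ items := t } : PySem.Dict κ β).get? r.1)))
          = [(pk, f d0 pb)] := by
        have hnone : ({ items := t } : PySem.Dict κ β).get? pk = none := by
          rw [PySem.Dict.get?_eq_none_iff_not_mem_keys, PySem.Dict.keys_mk]
          exact hpt
        simp [hnone, pvApply?]
      rw [h1, h2]
      simp

-- a present-or-absent lookup folded into one combine when the default payload is neutral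
theorem pv_match_getD {κ ν β : Type} [BEq κ] [LawfulBEq κ]
    (f : ν → β → ν) (b0 : β) (h0 : ∀ v, f v b0 = v) (d : PySem.Dict κ β) (k : κ) (v : ν) :
    pvApply? f v (d.get? k) = f v (d.getD k b0) := by
  cases h : d.get? k with
  | some b => rw [PySem.Dict.getD_of_get?_eq_some _ _ h]; rfl
  | none => rw [PySem.Dict.getD_of_get?_eq_none _ _ h, h0]; rfl

-- adding an element already present is a no-op
theorem pv_add_mem (s : PySem.Set String) (x : String) (h : x ∈ s) :
    PySem.Set.add s x = s := by simp [PySem.Set.add, h]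

theorem pv_update_add (s t : PySem.Set String) (x : String) :
    PySem.Set.update s (PySem.Set.add t x) = PySem.Set.add (PySem.Set.update s t) x := by
  by_cases h : x ∈ t
  · rw [pv_add_mem t x h, pv_add_mem]
    exact (PySem.Set.mem_update s t x).mpr (Or.inr h)
  · have : PySem.Set.add t x = t ++ [x] := by simp [PySem.Set.add, h]
    rw [this]
    show (t ++ [x]).foldl PySem.Set.add s = _
    rw [List.foldl_append]
    rfl

theorem pv_update_foldl_add (xs : List String) (t s : PySem.Set String) :
    PySem.Set.update s (xs.foldl PySem.Set.add t)
      = PySem.Set.update (PySem.Set.update s t) xs := by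
  induction xs generalizing t s with
  | nil => rfl
  | cons x xs ih =>
    show PySem.Set.update s (xs.foldl PySem.Set.add (PySem.Set.add t x)) = _
    rw [ih]
    rw [pv_update_add]
    rfl

-- updating by set(xs) is updating by xs (duplicates are skipped either way)
theorem pv_update_ofList (s : PySem.Set String) (xs : List String) :
    PySem.Set.update s (PySem.Set.ofList xs) = PySem.Set.update s xs := by
  rw [PySem.Set.ofList_eq_foldl, pv_update_foldl_add]
  rfl

-- items of a foldl-insert dict come from the start dict or from the inserted list
theorem pv_mem_items_foldl_insert {κ ν : Type} [BEq κ] [LawfulBEq κ]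
    (l : List (κ × ν)) (d : PySem.Dict κ ν) (p : κ × ν)
    (h : p ∈ (l.foldl (fun d q => d.insert q.1 q.2) d).items) : p ∈ d.items ∨ p ∈ l := by
  induction l generalizing d with
  | nil => exact Or.inl h
  | cons q l ih =>
    rcases ih _ h with h' | h'
    · rw [PySem.Dict.mem_items_insert] at h'
      rcases h' with h' | h'
      · right; simp [h']
      · exact Or.inl h'.1
    · right; exact List.mem_cons_of_mem _ h'

-- items of an ofList of mapped pairs have inner dicts with nodup keys
theorem pv_inner_nodup (xs : List (String × List (String × List String)))
    (p : String × PySem.Dict String (List String))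
    (h : p ∈ (PySem.Dict.ofList (xs.map (fun r => (r.1, PySem.Dict.ofList r.2)))).items) :
    p.2.keys.Nodup := by
  have h' : p ∈ ((xs.map (fun r => (r.1, PySem.Dict.ofList r.2))).foldl
      (fun d q => d.insert q.1 q.2) PySem.Dict.empty).items := h
  have := pv_mem_items_foldl_insert _ _ _ h'
  rcases this with h' | h'
  · simp [PySem.Dict.empty] at h'
  · rcases List.mem_map.mp h' with ⟨r, _, hr⟩
    rw [← hr]
    exact PySem.Dict.nodup_keys_ofList r.2

-- A's inner loop, item by item (instance of pv_merge_items; modify = insert of the combined value)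
theorem pv_inner_items (v : PySem.Dict String (PySem.Set String))
    (a2 : PySem.Dict String (List String)) (hv : v.keys.Nodup) (ha : a2.keys.Nodup) :
    (pvInnerMerge v a2).items
      = v.items.map (fun r =>
          (r.1, pvApply? (fun s vals => PySem.Set.update s vals) r.2 (a2.get? r.1)))
        ++ (a2.items.filter (fun q => !v.contains q.1)).map
            (fun q => (q.1, PySem.Set.update PySem.Set.empty q.2)) :=
  by obtain ⟨l2⟩ := a2
     show (l2.foldl (fun m p => m.insert p.1 (PySem.Set.update (m.getD p.1 PySem.Set.empty) p.2)) v).items = _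
     exact pv_merge_items (fun s vals => PySem.Set.update s vals) PySem.Set.empty l2 v hv ha

-- A's per-entity comprehension {str(attr): set(values) …} as a function
def pvConv (exA : PySem.Dict String (List String)) : PySem.Dict String (PySem.Set String) :=
  exA.items.foldl (fun inn q => inn.insert q.1 (PySem.Set.ofList q.2)) PySem.Dict.empty

theorem pv_conv_items (exA : PySem.Dict String (List String)) (hex : exA.keys.Nodup) :
    (pvConv exA).items = exA.items.map (fun q => (q.1, PySem.Set.ofList q.2)) := by
  have := PySem.Dict.items_foldl_insert_fresh exA.items (fun q => q.1)
    (fun q => PySem.Set.ofList q.2) PySem.Dict.empty (fun a _ => rfl) hex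
  simpa [pvConv] using this

theorem pv_conv_keys (exA : PySem.Dict String (List String)) (hex : exA.keys.Nodup) :
    (pvConv exA).keys = exA.keys := by
  simp only [PySem.Dict.keys]
  rw [pv_conv_items exA hex, List.map_map]
  rfl

theorem pv_conv_contains (exA : PySem.Dict String (List String)) (hex : exA.keys.Nodup)
    (x : String) : (pvConv exA).contains x = exA.contains x := by
  rw [PySem.Dict.contains_eq_decide_mem_keys, PySem.Dict.contains_eq_decide_mem_keys,
    pv_conv_keys exA hex]

-- for an entity present in existing: A's in-place merged inner dict is B's merged_entry
theorem pv_entry_ex (exA a2 : PySem.Dict String (List String))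
    (hex : exA.keys.Nodup) (ha : a2.keys.Nodup) :
    (pvInnerMerge (pvConv exA) a2).items = pvMergedEntry exA a2 := by
  have hknd : (pvConv exA).keys.Nodup := by rw [pv_conv_keys exA hex]; exact hex
  rw [pv_inner_items _ _ hknd ha, pv_conv_items exA hex]
  show _ = (exA.keys ++ a2.keys.filter (fun a => !exA.contains a)).map
    (fun a => (a, PySem.Set.union (PySem.Set.ofList (exA.getD a []))
      (PySem.Set.ofList (a2.getD a []))))
  rw [List.map_append, List.map_map]
  congr 1
  · have hk : exA.keys = exA.items.map (fun q => q.1) := rfl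
    rw [hk, List.map_map]
    apply List.map_congr_left
    intro q hq
    obtain ⟨a, vals⟩ := q
    have hget : exA.getD a [] = vals := PySem.Dict.getD_of_mem_items _ hq hex []
    simp only [Function.comp]
    rw [pv_match_getD (fun s vals => PySem.Set.update s vals) [] (fun v => rfl) a2 a]
    rw [hget]
    show (a, PySem.Set.update (PySem.Set.ofList vals) (a2.getD a []))
      = (a, PySem.Set.update (PySem.Set.ofList vals) (PySem.Set.ofList (a2.getD a [])))
    rw [pv_update_ofList]
  · have hfilter : a2.items.filter (fun q => !(pvConv exA).contains q.1)
        = a2.items.filter (fun q => !exA.contains q.1) :=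
      List.filter_congr (fun q _ => by rw [pv_conv_contains exA hex])
    rw [hfilter]
    have hkeys : a2.keys.filter (fun a => !exA.contains a)
        = (a2.items.filter (fun q => !exA.contains q.1)).map (fun q => q.1) := by
      show (a2.items.map (fun q => q.1)).filter (fun a => !exA.contains a) = _
      rw [List.filter_map]
      rfl
    rw [hkeys, List.map_map]
    apply List.map_congr_left
    intro q hq
    obtain ⟨a, vals⟩ := q
    have hmem := (List.mem_filter.mp hq).1
    have hcna : exA.contains a = false := by
      have := (List.mem_filter.mp hq).2; simpa using this
    have hgetx : exA.getD a [] = [] := PySem.Dict.getD_of_not_contains _ _ hcna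
    have hget2 : a2.getD a [] = vals := PySem.Dict.getD_of_mem_items _ hmem ha []
    simp only [Function.comp]
    show (a, PySem.Set.update PySem.Set.empty vals)
      = (a, PySem.Set.union (PySem.Set.ofList (exA.getD a []))
          (PySem.Set.ofList (a2.getD a [])))
    rw [hgetx, hget2]
    show _ = (a, PySem.Set.update (PySem.Set.ofList ([] : List String)) (PySem.Set.ofList vals))
    rw [pv_update_ofList]
    rfl

-- for an entity only in additional: A builds its inner dict from scratch; so does B
theorem pv_entry_new (a2 : PySem.Dict String (List String)) (ha : a2.keys.Nodup) :
    (pvInnerMerge PySem.Dict.empty a2).items = pvMergedEntry PySem.Dict.empty a2 := by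
  have h := pv_entry_ex PySem.Dict.empty a2 PySem.Dict.nodup_keys_empty ha
  have hconv : pvConv PySem.Dict.empty = PySem.Dict.empty := rfl
  rw [hconv] at h
  exact h

-- A's additional loop (insert form), item by item (instance of pv_merge_items)
theorem pv_outer_items (M0 : PySem.Dict String (PySem.Dict String (PySem.Set String)))
    (addD : PySem.Dict String (PySem.Dict String (List String)))
    (hM : M0.keys.Nodup) (ha : addD.keys.Nodup) :
    (addD.items.foldl
        (fun m p => m.insert p.1 (pvInnerMerge (m.getD p.1 PySem.Dict.empty) p.2)) M0).items
      = M0.items.map (fun r => (r.1, pvApply? pvInnerMerge r.2 (addD.get? r.1)))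
        ++ (addD.items.filter (fun p => !M0.contains p.1)).map
            (fun p => (p.1, pvInnerMerge PySem.Dict.empty p.2)) := by
  obtain ⟨l⟩ := addD
  exact pv_merge_items pvInnerMerge PySem.Dict.empty l M0 hM ha

-- any getD-fetched inner dict of a well-formed outer dict has nodup keys
theorem pv_getD_inner_nodup (d : PySem.Dict String (PySem.Dict String (List String)))
    (hin : ∀ p ∈ d.items, p.2.keys.Nodup) (k : String) :
    (d.getD k PySem.Dict.empty).keys.Nodup := by
  cases h : d.get? k with
  | some v =>
    rw [PySem.Dict.getD_of_get?_eq_some _ _ h]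
    exact hin (k, v) (PySem.Dict.mem_items_of_get?_eq_some _ h)
  | none =>
    rw [PySem.Dict.getD_of_get?_eq_none _ _ h]
    exact PySem.Dict.nodup_keys_empty

-- the whole function, for arbitrary well-formed source dicts
theorem pv_main (exD addD : PySem.Dict String (PySem.Dict String (List String)))
    (hex : exD.keys.Nodup) (hadd : addD.keys.Nodup)
    (hexin : ∀ p ∈ exD.items, p.2.keys.Nodup) (haddin : ∀ p ∈ addD.items, p.2.keys.Nodup) :
    (addD.items.foldl
        (fun m p =>
          let m := m.setdefault p.1 PySem.Dict.empty
          p.2.items.foldl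
            (fun m q => m.modify p.1 PySem.Dict.empty
              (fun inn => inn.modify q.1 PySem.Set.empty (fun s => PySem.Set.update s q.2)))
            m)
        (exD.items.foldl
          (fun m p => m.insert p.1
            (p.2.items.foldl (fun inn q => inn.insert q.1 (PySem.Set.ofList q.2)) PySem.Dict.empty))
          PySem.Dict.empty)).items.map (fun p => (p.1, p.2.items))
      = (exD.keys ++ addD.keys.filter (fun e => !exD.contains e)).map
          (fun eid => (eid, pvMergedEntry (exD.getD eid PySem.Dict.empty)
            (addD.getD eid PySem.Dict.empty))) := by
  -- phase 1: copying existing appends fresh keys in order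
  have hM0items : (exD.items.foldl (fun m p => m.insert p.1 (pvConv p.2)) PySem.Dict.empty).items
      = exD.items.map (fun p => (p.1, pvConv p.2)) := by
    have := PySem.Dict.items_foldl_insert_fresh exD.items (fun p => p.1)
      (fun p => pvConv p.2) PySem.Dict.empty (fun a _ => rfl) hex
    simpa using this
  set M0 := exD.items.foldl (fun m p => m.insert p.1 (pvConv p.2)) PySem.Dict.empty with hM0
  have hM0keys : M0.keys = exD.keys := by
    simp only [PySem.Dict.keys]
    rw [hM0items, List.map_map]
    rfl
  have hM0nd : M0.keys.Nodup := by rw [hM0keys]; exact hex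
  have hM0cont : ∀ x, M0.contains x = exD.contains x := fun x => by
    rw [PySem.Dict.contains_eq_decide_mem_keys, PySem.Dict.contains_eq_decide_mem_keys, hM0keys]
  -- phase 2: the additional loop in insert form, then item by item
  show (addD.items.foldl
        (fun m p =>
          p.2.items.foldl
            (fun m q => m.modify p.1 PySem.Dict.empty
              (fun inn => inn.modify q.1 PySem.Set.empty (fun s => PySem.Set.update s q.2)))
            (m.setdefault p.1 PySem.Dict.empty))
        M0).items.map (fun p => (p.1, p.2.items)) = _
  rw [pv_phase2_eq addD.items M0 hM0nd]
  rw [pv_outer_items M0 addD hM0nd hadd]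
  rw [List.map_append, List.map_map, List.map_map]
  rw [List.map_append]
  congr 1
  · -- entities of existing, in existing order
    rw [hM0items, List.map_map]
    have hk : exD.keys = exD.items.map (fun q => q.1) := rfl
    rw [hk, List.map_map]
    apply List.map_congr_left
    intro p hp
    obtain ⟨eid, inner⟩ := p
    have hgetx : exD.getD eid PySem.Dict.empty = inner :=
      PySem.Dict.getD_of_mem_items _ hp hex _
    simp only [Function.comp]
    rw [pv_match_getD pvInnerMerge PySem.Dict.empty (fun v => rfl) addD eid]
    show (eid, (pvInnerMerge (pvConv inner) (addD.getD eid PySem.Dict.empty)).items)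
      = (eid, pvMergedEntry (exD.getD eid PySem.Dict.empty) (addD.getD eid PySem.Dict.empty))
    rw [hgetx, pv_entry_ex inner _ (hexin (eid, inner) hp) (pv_getD_inner_nodup addD haddin eid)]
  · -- entities only in additional, in additional order
    have hfilter : addD.items.filter (fun p => !M0.contains p.1)
        = addD.items.filter (fun p => !exD.contains p.1) :=
      List.filter_congr (fun p _ => by rw [hM0cont])
    rw [hfilter]
    have hkeys : addD.keys.filter (fun e => !exD.contains e)
        = (addD.items.filter (fun p => !exD.contains p.1)).map (fun p => p.1) := by
      show (addD.items.map (fun p => p.1)).filter (fun e => !exD.contains e) = _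
      rw [List.filter_map]
      rfl
    rw [hkeys, List.map_map]
    apply List.map_congr_left
    intro p hp
    obtain ⟨eid, inner⟩ := p
    have hmem := (List.mem_filter.mp hp).1
    have hcna : exD.contains eid = false := by
      have := (List.mem_filter.mp hp).2; simpa using this
    have hgetx : exD.getD eid PySem.Dict.empty = PySem.Dict.empty :=
      PySem.Dict.getD_of_not_contains _ _ hcna
    have hget2 : addD.getD eid PySem.Dict.empty = inner :=
      PySem.Dict.getD_of_mem_items _ hmem hadd _
    simp only [Function.comp]
    show (eid, (pvInnerMerge PySem.Dict.empty inner).items)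
      = (eid, pvMergedEntry (exD.getD eid PySem.Dict.empty) (addD.getD eid PySem.Dict.empty))
    rw [hgetx, hget2, pv_entry_new inner (haddin (eid, inner) hmem)]

-- ===== VERDICT (by name: the statement is the Claim_ definition above) =====
theorem merge_used_temporal_values_py_spec : Claim_equal_merge_used_temporal_values_py := by
  intro existing additional _
  unfold Spec_merge_used_temporal_values_py
  exact pv_main
    (PySem.Dict.ofList ((existing.getD []).map (fun p => (p.1, PySem.Dict.ofList p.2))))
    (PySem.Dict.ofList (additional.map (fun p => (p.1, PySem.Dict.ofList p.2))))
    (PySem.Dict.nodup_keys_ofList _)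
    (PySem.Dict.nodup_keys_ofList _)
    (fun p hp => pv_inner_nodup _ p hp)
    (fun p hp => pv_inner_nodup _ p hp)
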